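-- pv_equiv track=rewrite | github.com/MohiuddinSohel/Leetcoding | amazonOAPreparation/OA.py | makeMinRotation
-- ===== SOURCE A (Python) =====
-- def makeMinRotation(s: str) -> str:
--     N = len(s)
--
--     l, r = N-1, N-1
--     m = N-1 # location of min character
--     for i in reversed(range(N)):
--         if s[i] < s[m]:
--             m = i
--         elif s[i] > s[m]:
--             l=i
--             r=m
--
--     if l != r:
--         return s[:l] + s[r] + s[l:r] + s[r+1:]
--     else:
--         return s
-- ===== SOURCE B (Python) =====
-- def makeMinRotation(s: str) -> str:
--     n = len(s)
--     if n == 0: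
--         return s
--     # suffix rightmost-minimum-index table
--     min_idx = [0] * n
--     min_idx[n - 1] = n - 1
--     for i in range(n - 2, -1, -1):
--         min_idx[i] = i if s[i] < s[min_idx[i + 1]] else min_idx[i + 1]
--     # first position that is strictly greater than the suffix minimum
--     for l in range(n):
--         r = min_idx[l]
--         if s[r] < s[l]:
--             return s[:l] + s[r] + s[l:r] + s[r + 1:]
--     return s
-- ===== Notes on version B (the rewrite author's own statement) =====
-- stated objective: alternative
-- what changed: A's single fused backward scan carrying (l, r, m) is split into building an explicit suffix-minimum-index table backwards and then a separate forward scan that finds the leftmost position strictly above its suffix minimum.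
import Mathlib
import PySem

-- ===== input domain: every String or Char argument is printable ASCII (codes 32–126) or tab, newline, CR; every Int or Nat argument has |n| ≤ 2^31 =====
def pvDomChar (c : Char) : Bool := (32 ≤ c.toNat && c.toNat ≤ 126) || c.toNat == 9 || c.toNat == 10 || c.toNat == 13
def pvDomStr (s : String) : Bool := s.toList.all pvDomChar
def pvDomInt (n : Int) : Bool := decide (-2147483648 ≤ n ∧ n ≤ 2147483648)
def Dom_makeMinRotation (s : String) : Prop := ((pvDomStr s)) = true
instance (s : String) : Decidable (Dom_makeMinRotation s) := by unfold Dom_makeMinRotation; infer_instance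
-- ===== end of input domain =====

-- B replaces A's single fused backward scan by a suffix-min-index table built backwards plus a separate
-- forward scan for the first improvable position (objective: alternative decomposition, same O(n) cost).

-- ===== PORT A =====
-- one step of A's backward loop over state (l, r, m); indices are always in range, so s[i] is getElem!
def pvAStep (cs : List Char) (st : Nat × Nat × Nat) (i : Nat) : Nat × Nat × Nat :=
  match st with
  | (l, r, m) =>
    if cs[i]! < cs[m]! then (l, r, i)
    else if cs[m]! < cs[i]! then (i, m, m)
    else (l, r, m)

-- Python slices s[:l], s[l:r], s[r+1:] with in-range non-negative l ≤ r are exactly take/drop.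
def makeMinRotation (s : String) : String :=
  let cs := s.toList
  let N := cs.length
  let st := (List.range N).reverse.foldl (pvAStep cs) (N - 1, N - 1, N - 1)
  let l := st.1
  let r := st.2.1
  if l ≠ r then
    String.ofList (cs.take l ++ [cs[r]!] ++ ((cs.drop l).take (r - l)) ++ cs.drop (r + 1))
  else s

-- ===== PORT B =====
-- Source B's min_idx table, built back to front: bmi cs lists, for each position j, the index of the
-- rightmost minimum of cs[j:] (indices relative to cs).
def pvBmi : List Char → List Nat
  | [] => []
  | c :: rest =>
    let t := pvBmi rest
    match t with
    | [] => [0]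
    | m :: _ => (if c < rest[m]!then 0 else m + 1) :: t.map (· + 1)

-- Source B's forward scan: first l with s[min_idx[l]] < s[l], returning (l, r).
def pvFindL (cs : List Char) : List Nat → Nat → Option (Nat × Nat)
  | [], _ => none
  | m :: rest, l => if cs[m]! < cs[l]! then some (l, m) else pvFindL cs rest (l + 1)

def makeMinRotation_alt (s : String) : String :=
  let cs := s.toList
  if cs.length = 0 then s
  else
    match pvFindL cs (pvBmi cs) 0 with
    | some (l, r) => String.ofList (cs.take l ++ [cs[r]!] ++ ((cs.drop l).take (r - l)) ++ cs.drop (r + 1))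
    | none => s

-- ===== PRECONDITION & SPEC =====
def Spec_makeMinRotation (s : String) (out : String) : Prop := out = makeMinRotation_alt s
instance (s : String) (out : String) : Decidable (Spec_makeMinRotation s out) := by unfold Spec_makeMinRotation; infer_instance

-- ===== CLAIM (what is proved, stated in full; the proofs are below) =====
def Claim_equal_makeMinRotation : Prop := ∀ (s : String), Dom_makeMinRotation s → Spec_makeMinRotation s (makeMinRotation s)

-- ===== LEMMAS AND PROOFS =====

-- index of the rightmost minimum of cs[i:]
def pvSmi (cs : List Char) (i : Nat) : Nat :=
  if _h : i + 1 < cs.length then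
    if cs[i]! < cs[pvSmi cs (i + 1)]! then i else pvSmi cs (i + 1)
  else i
termination_by cs.length - i

-- first l ≥ i with cs[pvSmi cs l] < cs[l]
def pvFb (cs : List Char) (i : Nat) : Option Nat :=
  if _h : i < cs.length then
    if cs[pvSmi cs i]! < cs[i]! then some i else pvFb cs (i + 1)
  else none
termination_by cs.length - i

lemma pvSmi_pos (cs : List Char) (i : Nat) (h : i + 1 < cs.length) :
    pvSmi cs i = if cs[i]! < cs[pvSmi cs (i + 1)]! then i else pvSmi cs (i + 1) := by
  rw [pvSmi, dif_pos h]

lemma pvSmi_neg (cs : List Char) (i : Nat) (h : ¬ i + 1 < cs.length) : pvSmi cs i = i := by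
  rw [pvSmi, dif_neg h]

lemma pvFb_pos (cs : List Char) (i : Nat) (h : i < cs.length) :
    pvFb cs i = if cs[pvSmi cs i]! < cs[i]! then some i else pvFb cs (i + 1) := by
  rw [pvFb, dif_pos h]

lemma pvFb_neg (cs : List Char) (i : Nat) (h : ¬ i < cs.length) : pvFb cs i = none := by
  rw [pvFb, dif_neg h]

-- A's loop as a downward iterator
def pvAGo (cs : List Char) : Nat → (Nat × Nat × Nat) → (Nat × Nat × Nat)
  | 0, st => st
  | i + 1, st => pvAGo cs i (pvAStep cs st i)

-- the mathematical state of A's loop after processing indices ≥ i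
def pvSt (cs : List Char) (i : Nat) : Nat × Nat × Nat :=
  match pvFb cs i with
  | some l => (l, pvSmi cs l, pvSmi cs i)
  | none => (cs.length - 1, cs.length - 1, pvSmi cs i)

lemma pvFoldl_eq_aGo (cs : List Char) (n : Nat) (st : Nat × Nat × Nat) :
    (List.range n).reverse.foldl (pvAStep cs) st = pvAGo cs n st := by
  induction n generalizing st with
  | zero => rfl
  | succ k ih =>
    rw [List.range_succ, List.reverse_append]
    simp only [List.reverse_singleton, List.singleton_append, List.foldl_cons]
    exact ih _

theorem pvStep_st (cs : List Char) (i : Nat) (h : i + 1 < cs.length) :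
    pvAStep cs (pvSt cs (i + 1)) i = pvSt cs i := by
  by_cases c1 : cs[i]! < cs[pvSmi cs (i + 1)]!
  · -- new minimum at i
    have hs : pvSmi cs i = i := by rw [pvSmi_pos cs i h, if_pos c1]
    have hf : pvFb cs i = pvFb cs (i + 1) := by
      rw [pvFb_pos cs i (Nat.lt_of_succ_lt h), hs, if_neg (lt_irrefl _)]
    unfold pvSt
    rw [hf, hs]
    cases hc : pvFb cs (i + 1) <;>
      · show pvAStep cs (_, _, pvSmi cs (i + 1)) i = _
        simp only [pvAStep]
        rw [if_pos c1]
  · by_cases c2 : cs[pvSmi cs (i + 1)]! < cs[i]!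
    · -- strict increase: record (l, r) := (i, m)
      have hs : pvSmi cs i = pvSmi cs (i + 1) := by rw [pvSmi_pos cs i h, if_neg c1]
      have hf : pvFb cs i = some i := by
        rw [pvFb_pos cs i (Nat.lt_of_succ_lt h), hs, if_pos c2]
      unfold pvSt
      rw [hf, hs]
      cases hc : pvFb cs (i + 1) <;>
        · show pvAStep cs (_, _, pvSmi cs (i + 1)) i = _
          simp only [pvAStep]
          rw [if_neg c1, if_pos c2, hs]
    · -- equal characters: nothing changes
      have hs : pvSmi cs i = pvSmi cs (i + 1) := by rw [pvSmi_pos cs i h, if_neg c1]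
      have hf : pvFb cs i = pvFb cs (i + 1) := by
        rw [pvFb_pos cs i (Nat.lt_of_succ_lt h), hs, if_neg c2]
      unfold pvSt
      rw [hf, hs]
      cases hc : pvFb cs (i + 1) <;>
        · show pvAStep cs (_, _, pvSmi cs (i + 1)) i = _
          simp only [pvAStep]
          rw [if_neg c1, if_neg c2]

lemma pvAGo_st (cs : List Char) : ∀ i, i < cs.length → pvAGo cs i (pvSt cs i) = pvSt cs 0 := by
  intro i
  induction i with
  | zero => intro _; rfl
  | succ k ih =>
    intro hk
    show pvAGo cs k (pvAStep cs (pvSt cs (k + 1)) k) = pvSt cs 0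
    rw [pvStep_st cs k hk]
    exact ih (Nat.lt_of_succ_lt hk)

lemma pvSt_top (cs : List Char) (h : 0 < cs.length) :
    pvSt cs (cs.length - 1) = (cs.length - 1, cs.length - 1, cs.length - 1) := by
  have hs : pvSmi cs (cs.length - 1) = cs.length - 1 := by
    rw [pvSmi_neg]; omega
  have hf : pvFb cs (cs.length - 1) = none := by
    rw [pvFb_pos cs _ (by omega), hs, if_neg (lt_irrefl _), pvFb_neg]; omega
  unfold pvSt
  rw [hf, hs]

lemma pvA_loop_result (cs : List Char) (h : 0 < cs.length) :
    (List.range cs.length).reverse.foldl (pvAStep cs)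
      (cs.length - 1, cs.length - 1, cs.length - 1) = pvSt cs 0 := by
  obtain ⟨k, hk⟩ : ∃ k, cs.length = k + 1 := ⟨cs.length - 1, (Nat.sub_add_cancel h).symm⟩
  rw [pvFoldl_eq_aGo]
  rw [hk]
  simp only [Nat.add_sub_cancel]
  have hk1 : cs.length - 1 = k := by omega
  show pvAGo cs k (pvAStep cs (k, k, k) k) = pvSt cs 0
  have hstep : pvAStep cs (k, k, k) k = (k, k, k) := by
    simp only [pvAStep]
    rw [if_neg (lt_irrefl _), if_neg (lt_irrefl _)]
  have htop : pvSt cs k = (k, k, k) := by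
    rw [← hk1, pvSt_top cs h, hk1]
  rw [hstep, ← htop]
  exact pvAGo_st cs k (by omega)

-- shift lemma for the table: indices in cs[1:] are off by one
lemma pvSmi_cons (c : Char) (rest : List Char) :
    ∀ k j, rest.length - j ≤ k → j < rest.length →
      pvSmi (c :: rest) (j + 1) = pvSmi rest j + 1 := by
  intro k
  induction k with
  | zero => intro j h1 h2; omega
  | succ k ih =>
    intro j h1 h2
    by_cases hj : j + 1 < rest.length
    · have ihj := ih (j + 1) (by omega) hj
      rw [pvSmi_pos (c :: rest) (j + 1) (by simp; omega), pvSmi_pos rest j hj, ihj]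
      simp only [List.getElem!_cons_succ]
      split_ifs <;> rfl
    · rw [pvSmi_neg (c :: rest) (j + 1) (by simp; omega), pvSmi_neg rest j hj]

lemma pvBmi_length (cs : List Char) : (pvBmi cs).length = cs.length := by
  induction cs with
  | nil => rfl
  | cons c rest ih =>
    rw [pvBmi]
    cases hbr : pvBmi rest with
    | nil => simp_all
    | cons m ms => simp_all

lemma pvBmi_get (cs : List Char) : ∀ j, j < cs.length → (pvBmi cs)[j]? = some (pvSmi cs j) := by
  induction cs with
  | nil => intro j hj; simp at hj
  | cons c rest ih =>
    intro j hj
    cases rest with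
    | nil =>
      obtain rfl : j = 0 := by simpa using hj
      rw [show pvBmi [c] = [0] from rfl, pvSmi_neg [c] 0 (by simp)]
      rfl
    | cons d rs =>
      have hrlen : 0 < (d :: rs).length := by simp
      cases hbr : pvBmi (d :: rs) with
      | nil => have := pvBmi_length (d :: rs); simp_all
      | cons m ms =>
        have hm : m = pvSmi (d :: rs) 0 := by
          have := ih 0 hrlen
          rw [hbr] at this
          simpa using this
        have hshift := fun (j : Nat) hj =>
          pvSmi_cons c (d :: rs) ((d :: rs).length) j (by omega) hj
        cases j with
        | zero =>
          rw [pvBmi, hbr]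
          rw [pvSmi_pos (c :: d :: rs) 0 (by simp), hshift 0 hrlen, ← hm]
          simp only [List.getElem!_cons_succ, List.getElem!_cons_zero]
          rfl
        | succ n =>
          have hn : n < (d :: rs).length := by simpa using hj
          have := ih n hn
          rw [hbr] at this
          rw [pvBmi, hbr]
          simp only [List.getElem?_cons_succ, List.getElem?_map, this, Option.map_some,
            hshift n hn]

lemma pvFindL_eq_fb (cs : List Char) :
    ∀ mi l, (∀ k, k < mi.length → mi[k]? = some (pvSmi cs (l + k))) → mi.length + l = cs.length →
      pvFindL cs mi l = (pvFb cs l).map (fun x => (x, pvSmi cs x)) := by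
  intro mi
  induction mi with
  | nil =>
    intro l _ hlen
    rw [pvFb_neg cs l (by simp at hlen; omega)]
    rfl
  | cons m rest ih =>
    intro l hget hlen
    have hm : m = pvSmi cs l := by
      have := hget 0 (by simp)
      simpa using this
    have hl : l < cs.length := by simp at hlen; omega
    rw [pvFindL, pvFb_pos cs l hl, hm]
    by_cases hc : cs[pvSmi cs l]! < cs[l]!
    · rw [if_pos hc, if_pos hc]
      rfl
    · rw [if_neg hc, if_neg hc]
      apply ih
      · intro k hk
        have := hget (k + 1) (by simpa using Nat.succ_lt_succ hk)
        simpa [Nat.add_right_comm, Nat.add_assoc, Nat.add_comm 1 k] using this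
      · simp at hlen ⊢; omega

lemma pvFb_lt (cs : List Char) : ∀ i x, pvFb cs i = some x → cs[pvSmi cs x]! < cs[x]! := by
  intro i
  induction' hmeas : cs.length - i with k ih generalizing i
  · intro x hx
    rw [pvFb_neg cs i (by omega)] at hx
    exact absurd hx (by simp)
  · intro x hx
    by_cases hi : i < cs.length
    · rw [pvFb_pos cs i hi] at hx
      by_cases hc : cs[pvSmi cs i]! < cs[i]!
      · rw [if_pos hc] at hx
        cases hx; exact hc
      · rw [if_neg hc] at hx
        exact ih (i + 1) (by omega) x hx
    · rw [pvFb_neg cs i hi] at hx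
      exact absurd hx (by simp)

-- ===== VERDICT (by name: the statement is the Claim_ definition above) =====
theorem makeMinRotation_spec : Claim_equal_makeMinRotation := by
  intro s _
  unfold Spec_makeMinRotation makeMinRotation makeMinRotation_alt
  set cs := s.toList with hcs
  by_cases hn : cs.length = 0
  · simp [hn, List.range_zero]
  · have h : 0 < cs.length := Nat.pos_of_ne_zero hn
    rw [if_neg hn]
    have hB : pvFindL cs (pvBmi cs) 0 = (pvFb cs 0).map (fun x => (x, pvSmi cs x)) := by
      apply pvFindL_eq_fb
      · intro k hk
        rw [pvBmi_length] at hk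
        simpa using pvBmi_get cs k hk
      · simp [pvBmi_length]
    simp only [pvA_loop_result cs h, hB]
    unfold pvSt
    cases hfb : pvFb cs 0 with
    | none => simp
    | some x =>
      have hlt := pvFb_lt cs 0 x hfb
      have hne : x ≠ pvSmi cs x := by
        intro hxe
        rw [← hxe] at hlt
        exact lt_irrefl _ hlt
      simp [hne]
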